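-- pv_equiv track=rewrite | github.com/Ayaan735229/ICS4U | ApplyingMatricesToArrays/L1-MatrixAdditionForAMagicSquare-1.py | make5x5
-- ===== SOURCE A (Python) =====
-- def make5x5(M, shift):
--   matrix = []
--   matrix.append(M.copy())
--   m_dim = len(M)
--
--   for i in range(m_dim-1):
--     tempRow = []
--     for j in range(m_dim):
--       tempRow.append(matrix[i][(j + (m_dim - shift)) % m_dim])
--     matrix.append(tempRow)
--   return matrix
-- ===== SOURCE B (Python) =====
-- def make5x5(M, shift):
--   m = len(M)
--   matrix = [M.copy()]
--   for _ in range(m - 1):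
--     k = (m - shift) % m
--     prev = matrix[-1]
--     matrix.append(prev[k:] + prev[:k])
--   return matrix
-- ===== Notes on version B (the rewrite author's own statement) =====
-- stated objective: faster
-- what changed: Each new row is the previous row rotated by slicing (prev[k:] + prev[:k] with k = (m-shift) % m), eliminating A's inner per-element loop that indexes modularly into the growing matrix; slicing copies rows in bulk instead of element by element.
import Mathlib
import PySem

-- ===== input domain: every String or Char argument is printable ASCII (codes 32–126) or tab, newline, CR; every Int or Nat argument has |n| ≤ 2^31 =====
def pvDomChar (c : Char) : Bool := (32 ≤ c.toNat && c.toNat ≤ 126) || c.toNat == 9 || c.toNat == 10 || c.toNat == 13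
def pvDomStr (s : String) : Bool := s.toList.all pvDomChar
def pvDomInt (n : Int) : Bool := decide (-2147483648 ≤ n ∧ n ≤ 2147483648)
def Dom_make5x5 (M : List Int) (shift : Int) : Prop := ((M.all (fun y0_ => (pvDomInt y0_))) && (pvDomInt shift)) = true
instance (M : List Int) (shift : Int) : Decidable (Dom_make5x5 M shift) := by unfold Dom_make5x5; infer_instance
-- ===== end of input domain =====

-- B builds each new row by rotating the previous row with slicing (prev[k:] + prev[:k],
-- k = (m-shift) % m), removing A's inner per-element loop with modular indexing (objective: alternative).

-- ===== PORT A =====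
-- matrix[i] and matrix[i][…] are always in range when reached, so the pyGetD defaults are never used.
def make5x5 (M : List Int) (shift : Int) : List (List Int) :=
  let m_dim : Int := (M.length : Int)
  (PySem.List.pyRange 0 (m_dim - 1) 1).foldl
    (fun matrix i =>
      matrix ++
        [(PySem.List.pyRange 0 m_dim 1).foldl
          (fun tempRow j =>
            tempRow ++ [PySem.List.pyGetD (PySem.List.pyGetD matrix i [])
                          (PySem.Int.mod (j + (m_dim - shift)) m_dim) 0])
          []])
    [M]

-- ===== PORT B =====
-- matrix[-1] is always in range (matrix starts non-empty), so the pyGetD default is never used.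
def make5x5_alt (M : List Int) (shift : Int) : List (List Int) :=
  let m : Int := (M.length : Int)
  (PySem.List.pyRange 0 (m - 1) 1).foldl
    (fun matrix _ =>
      let k := PySem.Int.mod (m - shift) m
      let prev := PySem.List.pyGetD matrix (-1) []
      matrix ++ [PySem.List.slice prev (some k) none ++ PySem.List.slice prev none (some k)])
    [M]

-- ===== PRECONDITION & SPEC =====
def Spec_make5x5 (M : List Int) (shift : Int) (out : List (List Int)) : Prop := out = make5x5_alt M shift
instance (M : List Int) (shift : Int) (out : List (List Int)) : Decidable (Spec_make5x5 M shift out) := by unfold Spec_make5x5; infer_instance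

-- ===== CLAIM (what is proved, stated in full; the proofs are below) =====
def Claim_equal_make5x5 : Prop := ∀ (M : List Int) (shift : Int), Dom_make5x5 M shift → Spec_make5x5 M shift (make5x5 M shift)

-- ===== LEMMAS AND PROOFS =====

-- the closed-form row i (both programs' row i equals this)
def pvRowB (M : List Int) (shift : Int) (i : Int) : List Int :=
  (PySem.List.pyRange 0 (M.length : Int) 1).map
    (fun j => PySem.List.pyGetD M (PySem.Int.mod (j + i * ((M.length : Int) - shift)) (M.length : Int)) 0)

theorem pvRowB_zero (M : List Int) (shift : Int) (hM : M ≠ []) : pvRowB M shift 0 = M := by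
  unfold pvRowB
  have hm : (0:Int) < (M.length : Int) := by
    have := List.length_pos_iff.mpr hM; exact_mod_cast this
  have h : ∀ j, j ∈ PySem.List.pyRange 0 (M.length : Int) 1 →
      PySem.List.pyGetD M (PySem.Int.mod (j + 0 * ((M.length : Int) - shift)) (M.length : Int)) 0
      = PySem.List.pyGetD M j 0 := by
    intro j hj
    rw [PySem.List.mem_pyRange_one] at hj
    have h2 : PySem.Int.mod (j + 0 * ((M.length : Int) - shift)) (M.length : Int) = j := by
      rw [PySem.Int.mod_eq_emod_of_pos hm]
      simpa using Int.emod_eq_of_lt hj.1 hj.2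
    rw [h2]
  rw [List.map_congr_left h]
  exact PySem.List.map_pyGetD_pyRange_zero M 0

theorem pvRowB_length (M : List Int) (shift : Int) (i : Int) : (pvRowB M shift i).length = M.length := by
  unfold pvRowB
  simp [PySem.List.pyRange_zero_natCast]

-- one pass of A's inner loop over row i builds row i+1
theorem pvRowB_succ (M : List Int) (shift : Int) (i : Int) :
    (PySem.List.pyRange 0 (M.length : Int) 1).foldl
      (fun tempRow j =>
        tempRow ++ [PySem.List.pyGetD (pvRowB M shift i)
          (PySem.Int.mod (j + ((M.length : Int) - shift)) (M.length : Int)) 0]) []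
    = pvRowB M shift (i + 1) := by
  rw [PySem.List.foldl_append_singleton_eq_map]
  unfold pvRowB
  simp only [List.nil_append]
  apply List.map_congr_left
  intro j hj
  rw [PySem.List.mem_pyRange_one] at hj
  have hm : (0:Int) < (M.length : Int) := lt_of_le_of_lt hj.1 hj.2
  set m : Int := (M.length : Int)
  have hk0 : 0 ≤ PySem.Int.mod (j + (m - shift)) m := PySem.Int.mod_nonneg _ hm
  have hk1 : PySem.Int.mod (j + (m - shift)) m < m := PySem.Int.mod_lt _ hm
  rw [PySem.List.pyGetD_map_pyRange_of_nonneg _ _ _ _ hk0 hk1]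
  congr 1
  rw [PySem.Int.mod_eq_emod_of_pos hm, PySem.Int.mod_eq_emod_of_pos hm,
      PySem.Int.mod_eq_emod_of_pos hm, Int.emod_add_emod]
  congr 1
  ring

-- B's rotation of row i is row i+1
theorem pvRowB_rot (M : List Int) (shift : Int) (i : Int) (hM : M ≠ []) :
    PySem.List.slice (pvRowB M shift i) (some (PySem.Int.mod ((M.length : Int) - shift) (M.length : Int))) none
      ++ PySem.List.slice (pvRowB M shift i) none (some (PySem.Int.mod ((M.length : Int) - shift) (M.length : Int)))
    = pvRowB M shift (i + 1) := by
  have hm : (0:Int) < (M.length : Int) := by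
    have := List.length_pos_iff.mpr hM; exact_mod_cast this
  set m : Int := (M.length : Int) with hmdef
  set d : Int := m - shift with hddef
  set k : Int := PySem.Int.mod d m with hkdef
  have hk0 : 0 ≤ k := PySem.Int.mod_nonneg _ hm
  have hk1 : k < m := PySem.Int.mod_lt _ hm
  have hkemod : k = d % m := by rw [hkdef, PySem.Int.mod_eq_emod_of_pos hm]
  have hkn : (k.toNat : Int) = k := Int.toNat_of_nonneg hk0
  have hknlt : k.toNat < M.length := by omega
  have hr : ∀ (a : Int) (idx : Nat) (h : idx < M.length),
      (pvRowB M shift a)[idx]'(by rw [pvRowB_length]; exact h)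
      = PySem.List.pyGetD M (PySem.Int.mod ((idx : Int) + a * d) m) 0 := by
    intro a idx h
    have h2 := PySem.List.getElem?_map_pyRange_zero
      (fun j => PySem.List.pyGetD M (PySem.Int.mod (j + a * d) m) 0) M.length idx h
    have h3 : (pvRowB M shift a)[idx]? = some (PySem.List.pyGetD M (PySem.Int.mod ((idx:Int) + a * d) m) 0) := by
      unfold pvRowB; exact h2
    rw [List.getElem?_eq_getElem (by rw [pvRowB_length]; exact h)] at h3
    exact Option.some_inj.mp h3
  rw [PySem.List.slice_from _ hk0, PySem.List.slice_to _ hk0]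
  apply List.ext_getElem
  · simp [pvRowB_length]; omega
  · intro j hj hj'
    have hjlen : j < M.length := by
      simpa [pvRowB_length] using hj'
    have hlen : (List.drop k.toNat (pvRowB M shift i)).length = M.length - k.toNat := by
      simp [pvRowB_length]
    rw [List.getElem_append]
    split
    · next hlt =>
        have hlt' : j < M.length - k.toNat := by omega
        rw [List.getElem_drop, hr i (k.toNat + j) (by omega), hr (i+1) j hjlen]
        congr 1
        have e1 : ((k.toNat + j : Nat) : Int) + i * d = d % m + ((j:Int) + i * d) := by
          push_cast
          rw [hkn, hkemod]
          ring
        rw [e1, PySem.Int.mod_eq_emod_of_pos hm, PySem.Int.mod_eq_emod_of_pos hm,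
            Int.emod_add_emod]
        congr 1
        ring
    · next hge =>
        have hge' : M.length - k.toNat ≤ j := by omega
        rw [List.getElem_take, hr i _ (by omega), hr (i+1) j hjlen]
        congr 1
        have hc : ((j - (M.length - k.toNat) : Nat) : Int) = (j:Int) - m + k := by omega
        have e2 : ((j - (List.drop k.toNat (pvRowB M shift i)).length : Nat) : Int) + i * d
            = d % m + ((j:Int) + i * d) - m := by
          rw [hlen, hc, ← hkemod]
          ring
        rw [e2, PySem.Int.mod_eq_emod_of_pos hm, PySem.Int.mod_eq_emod_of_pos hm,
            Int.sub_emod_right, Int.emod_add_emod]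
        congr 1
        ring

-- the matrix consisting of rows 0..t-1
def pvRows (M : List Int) (shift : Int) (t : Int) : List (List Int) :=
  (PySem.List.pyRange 0 t 1).map (pvRowB M shift)

theorem pvRows_one (M : List Int) (shift : Int) (hM : M ≠ []) : pvRows M shift 1 = [M] := by
  unfold pvRows
  have h : PySem.List.pyRange 0 1 1 = [0] := by decide
  rw [h]
  simp [pvRowB_zero M shift hM]

theorem pvRows_get (M : List Int) (shift : Int) (t i : Int) (h0 : 0 ≤ i) (h1 : i < t) :
    PySem.List.pyGetD (pvRows M shift t) i [] = pvRowB M shift i := by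
  unfold pvRows
  rw [PySem.List.pyGetD_map_pyRange_of_nonneg _ _ _ _ h0 h1]

theorem pvRows_succ (M : List Int) (shift : Int) (t : Int) (h : 0 ≤ t) :
    pvRows M shift t ++ [pvRowB M shift t] = pvRows M shift (t + 1) := by
  unfold pvRows
  rw [PySem.List.pyRange_one_succ_right h, List.map_append]
  simp

theorem pvRows_last (M : List Int) (shift : Int) (t : Int) (h : 0 ≤ t) :
    PySem.List.pyGetD (pvRows M shift (t + 1)) (-1) [] = pvRowB M shift t := by
  rw [← pvRows_succ M shift t h, PySem.List.pyGetD_neg_one_append_singleton]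

-- A's loop invariant: starting with rows 0..a, the remaining iterations append rows a+1..a+n
theorem pvA_inv (M : List Int) (shift : Int) :
    ∀ (n : Nat) (a : Int), 0 ≤ a → (M.length : Int) - 1 - a = n →
    (PySem.List.pyRange a ((M.length : Int) - 1) 1).foldl
      (fun matrix i =>
        matrix ++
          [(PySem.List.pyRange 0 (M.length : Int) 1).foldl
            (fun tempRow j =>
              tempRow ++ [PySem.List.pyGetD (PySem.List.pyGetD matrix i [])
                            (PySem.Int.mod (j + ((M.length : Int) - shift)) (M.length : Int)) 0])
            []])
      (pvRows M shift (a + 1))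
    = pvRows M shift ((n : Int) + (a + 1)) := by
  intro n
  induction n with
  | zero =>
      intro a ha hn
      have hle : (M.length : Int) - 1 ≤ a := by omega
      rw [PySem.List.pyRange_one_eq_nil hle, List.foldl_nil]
      norm_num
  | succ k ih =>
      intro a ha hn
      have hlt : a < (M.length : Int) - 1 := by omega
      rw [PySem.List.pyRange_one_cons hlt]
      simp only [List.foldl_cons]
      have h1 : PySem.List.pyGetD (pvRows M shift (a + 1)) a [] = pvRowB M shift a :=
        pvRows_get M shift (a + 1) a ha (by omega)
      rw [h1, pvRowB_succ, pvRows_succ M shift (a + 1) (by omega),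
          ih (a + 1) (by omega) (by push_cast at hn ⊢; omega)]
      congr 1
      push_cast
      ring

-- B's loop invariant: starting with rows 0..a, the remaining iterations rotate-and-append rows a+1..a+n
theorem pvB_inv (M : List Int) (shift : Int) (hM : M ≠ []) :
    ∀ (n : Nat) (a : Int), 0 ≤ a → (M.length : Int) - 1 - a = n →
    (PySem.List.pyRange a ((M.length : Int) - 1) 1).foldl
      (fun matrix _ =>
        let k := PySem.Int.mod ((M.length : Int) - shift) (M.length : Int)
        let prev := PySem.List.pyGetD matrix (-1) []
        matrix ++ [PySem.List.slice prev (some k) none ++ PySem.List.slice prev none (some k)])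
      (pvRows M shift (a + 1))
    = pvRows M shift ((n : Int) + (a + 1)) := by
  intro n
  induction n with
  | zero =>
      intro a ha hn
      have hle : (M.length : Int) - 1 ≤ a := by omega
      rw [PySem.List.pyRange_one_eq_nil hle, List.foldl_nil]
      norm_num
  | succ k ih =>
      intro a ha hn
      have hlt : a < (M.length : Int) - 1 := by omega
      rw [PySem.List.pyRange_one_cons hlt]
      simp only [List.foldl_cons]
      rw [pvRows_last M shift a ha, pvRowB_rot M shift a hM,
          pvRows_succ M shift (a + 1) (by omega),
          ih (a + 1) (by omega) (by push_cast at hn ⊢; omega)]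
      congr 1
      push_cast
      ring

-- ===== VERDICT (by name: the statement is the Claim_ definition above) =====
theorem make5x5_spec : Claim_equal_make5x5 := by
  intro M shift _
  unfold Spec_make5x5
  rcases eq_or_ne M [] with hM | hM
  · subst hM
    norm_num [make5x5, make5x5_alt, PySem.List.pyRange_one_eq_nil]
  · have hm : (0:Int) < (M.length : Int) := by
      have := List.length_pos_iff.mpr hM; exact_mod_cast this
    have hA : make5x5 M shift = pvRows M shift (M.length : Int) := by
      unfold make5x5
      have h0 : pvRows M shift (0 + 1) = [M] := by norm_num [pvRows_one M shift hM]
      rw [← h0, pvA_inv M shift ((M.length : Int) - 1).toNat 0 le_rfl (by omega)]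
      congr 1
      omega
    have hB : make5x5_alt M shift = pvRows M shift (M.length : Int) := by
      unfold make5x5_alt
      have h0 : pvRows M shift (0 + 1) = [M] := by norm_num [pvRows_one M shift hM]
      rw [← h0, pvB_inv M shift hM ((M.length : Int) - 1).toNat 0 le_rfl (by omega)]
      congr 1
      omega
    rw [hA, hB]
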